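-- pv_equiv track=rewrite | github.com/IndestructibleAutoOps/indestructible-auto-ops | ecosystem/scripts/root-legacy/synthesize_findings.py | convert_references_to_indestructible
-- ===== SOURCE A (Python) =====
-- def convert_references_to_indestructible(text):
--     """Convert all Monica AI references to IndestructibleAutoOps AI"""
--     if not text:
--         return text
--
--     replacements = [
--         ('Monica AI', 'IndestructibleAutoOps AI'),
--         ('Monica', 'IndestructibleAutoOps'),
--         ('monica', 'indestructible_autoops'),
--         ('MONICA', 'INDESTRUCTIBLE_AUTOOPS')
--     ]
--
--     for old, new in replacements:
--         text = text.replace(old, new)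
--
--     return text
-- ===== SOURCE B (Python) =====
-- _RULES = (
--     ('Monica AI', 'IndestructibleAutoOps AI'),
--     ('Monica', 'IndestructibleAutoOps'),
--     ('monica', 'indestructible_autoops'),
--     ('MONICA', 'INDESTRUCTIBLE_AUTOOPS'),
-- )
--
--
-- def convert_references_to_indestructible(text):
--     """Convert all Monica AI references to IndestructibleAutoOps AI"""
--     if not text:
--         return text
--     out = []
--     i = 0
--     n = len(text)
--     while i < n:
--         for old, new in _RULES:
--             if text.startswith(old, i):
--                 out.append(new)
--                 i += len(old)
--                 break
--         else:
--             out.append(text[i])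
--             i += 1
--     return ''.join(out)
-- ===== Notes on version B (the rewrite author's own statement) =====
-- stated objective: alternative
-- what changed: B makes a single left-to-right scan over the text, matching the four patterns by priority ('Monica AI' before 'Monica') at each position and emitting replacements into one output buffer, instead of A's four sequential full-string replace passes.
import Mathlib
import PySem

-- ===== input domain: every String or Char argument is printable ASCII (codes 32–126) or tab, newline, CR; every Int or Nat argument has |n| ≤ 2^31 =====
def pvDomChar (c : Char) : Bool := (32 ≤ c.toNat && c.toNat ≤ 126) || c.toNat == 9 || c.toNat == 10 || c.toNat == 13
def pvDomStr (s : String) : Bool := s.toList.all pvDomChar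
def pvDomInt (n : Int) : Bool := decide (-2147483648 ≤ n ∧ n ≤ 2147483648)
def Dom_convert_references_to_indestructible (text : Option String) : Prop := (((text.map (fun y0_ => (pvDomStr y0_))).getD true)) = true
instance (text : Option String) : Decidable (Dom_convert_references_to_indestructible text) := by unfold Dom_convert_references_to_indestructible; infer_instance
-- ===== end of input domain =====

-- B replaces A's four sequential full-string replace passes by one left-to-right scan with
-- pattern priority ('Monica AI' before 'Monica'); same return value, alternative algorithm.


-- ===== PORT A =====
def pvReplacements : List (String × String) :=
  [("Monica AI", "IndestructibleAutoOps AI"),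
   ("Monica", "IndestructibleAutoOps"),
   ("monica", "indestructible_autoops"),
   ("MONICA", "INDESTRUCTIBLE_AUTOOPS")]

def convert_references_to_indestructible (text : Option String) : Option String :=
  match text with
  | none => none                      -- 'if not text: return text' for text = None
  | some t =>
    if t = "" then some t             -- 'if not text: return text' for the empty string
    else some (pvReplacements.foldl (fun s p => PySem.Str.replace s p.1 p.2) t)

-- ===== PORT B =====
-- single left-to-right scan; each branch is one entry of Source B's _RULES, tried in order
def pvScan : List Char → List Char
  | [] => []
  | c :: t =>
    if ("Monica AI".toList).isPrefixOf (c :: t) then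
      "IndestructibleAutoOps AI".toList ++ pvScan (t.drop 8)
    else if ("Monica".toList).isPrefixOf (c :: t) then
      "IndestructibleAutoOps".toList ++ pvScan (t.drop 5)
    else if ("monica".toList).isPrefixOf (c :: t) then
      "indestructible_autoops".toList ++ pvScan (t.drop 5)
    else if ("MONICA".toList).isPrefixOf (c :: t) then
      "INDESTRUCTIBLE_AUTOOPS".toList ++ pvScan (t.drop 5)
    else c :: pvScan t
termination_by s => s.length
decreasing_by all_goals simp

def convert_references_to_indestructible_alt (text : Option String) : Option String :=
  match text with
  | none => none
  | some t =>
    if t = "" then some t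
    else some (String.ofList (pvScan t.toList))

-- ===== PRECONDITION & SPEC =====
def Spec_convert_references_to_indestructible (text : Option String) (out : Option String) : Prop := out = convert_references_to_indestructible_alt text
instance (text : Option String) (out : Option String) : Decidable (Spec_convert_references_to_indestructible text out) := by unfold Spec_convert_references_to_indestructible; infer_instance

-- ===== CLAIM (what is proved, stated in full; the proofs are below) =====
def Claim_equal_convert_references_to_indestructible : Prop := ∀ (text : Option String), Dom_convert_references_to_indestructible text → Spec_convert_references_to_indestructible text (convert_references_to_indestructible text)

-- ===== LEMMAS AND PROOFS =====

-- structural form of Python's str.replace for a nonempty pattern (one scan, leftmost matches)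
def pvRep (old new : List Char) : List Char → List Char
  | [] => []
  | c :: t =>
    if old.isPrefixOf (c :: t) then new ++ pvRep old new (t.drop (old.length - 1))
    else c :: pvRep old new t
termination_by s => s.length
decreasing_by all_goals simp

theorem pvRep_nil (old new : List Char) : pvRep old new [] = [] := by rw [pvRep]

theorem pvRep_fire (old new : List Char) (hne : old ≠ []) (X : List Char) :
    pvRep old new (old ++ X) = new ++ pvRep old new X := by
  obtain ⟨o, old', rfl⟩ := List.exists_cons_of_ne_nil hne
  have hpre : (o :: old').isPrefixOf (o :: (old' ++ X)) = true := by
    rw [← List.cons_append]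
    exact List.isPrefixOf_iff_prefix.mpr (List.prefix_append _ _)
  rw [List.cons_append, pvRep, if_pos hpre]
  simp

theorem pvRep_nofire (old new : List Char) (c : Char) (t : List Char)
    (h : ¬ old.isPrefixOf (c :: t) = true) :
    pvRep old new (c :: t) = c :: pvRep old new t := by
  rw [pvRep, if_neg h]

-- the scan passes a block untouched when the pattern's first character does not occur in it
theorem pvRep_append (old new : List Char) (h : Char) (hh : old.head? = some h) :
    ∀ (p X : List Char), h ∉ p → pvRep old new (p ++ X) = p ++ pvRep old new X := by
  intro p
  induction p with
  | nil => intro X _; simp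
  | cons a p' ih =>
    intro X hp
    have hnf : ¬ old.isPrefixOf (a :: (p' ++ X)) = true := by
      intro hpre
      obtain ⟨o, old'', ho⟩ := List.exists_cons_of_ne_nil
        (show old ≠ [] by intro h0; rw [h0] at hh; simp at hh)
      rw [ho] at hpre hh
      rw [List.isPrefixOf_iff_prefix, List.cons_prefix_cons] at hpre
      simp only [List.head?_cons, Option.some.injEq] at hh
      exact hp (by simp [hh ▸ hpre.1])
    rw [List.cons_append, pvRep_nofire _ _ _ _ hnf, ih X (by simp_all)]
    simp

-- the fuel-driven PySem.Chars.replace.go equals the structural scan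
theorem pvRep_go (old new : List Char) (hne : old ≠ []) :
    ∀ (fuel : Nat) (l acc : List Char), l.length ≤ fuel →
      PySem.Chars.replace.go old new fuel l acc = acc.reverse ++ pvRep old new l := by
  intro fuel
  induction fuel with
  | zero =>
    intro l acc hl
    have : l = [] := List.length_eq_zero_iff.mp (Nat.le_zero.mp hl)
    subst this
    rw [PySem.Chars.replace.go.eq_def]
    simp [pvRep_nil]
  | succ n ih =>
    intro l acc hl
    match l with
    | [] => rw [PySem.Chars.replace.go.eq_def]; simp [pvRep_nil]
    | c :: t =>
      rw [PySem.Chars.replace.go.eq_def]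
      dsimp only
      by_cases hpre : old.isPrefixOf (c :: t) = true
      · rw [if_pos hpre]
        have h1 : 1 ≤ old.length := by
          cases old with
          | nil => exact absurd rfl hne
          | cons _ _ => simp
        have hdl : (List.drop old.length (c :: t)).length ≤ n := by
          simp only [List.length_drop, List.length_cons] at *
          omega
        rw [ih _ _ hdl]
        have hdrop : List.drop old.length (c :: t) = t.drop (old.length - 1) := by
          obtain ⟨o, old', rfl⟩ := List.exists_cons_of_ne_nil hne
          simp
        rw [hdrop, pvRep, if_pos hpre]
        simp
      · rw [if_neg hpre]
        have ht : t.length ≤ n := by simp at hl; omega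
        rw [ih _ _ ht, pvRep_nofire _ _ _ _ hpre]
        simp

theorem replace_eq_pvRep (old new s : List Char) (hne : old ≠ []) :
    PySem.Chars.replace s old new = pvRep old new s := by
  rw [PySem.Chars.replace]
  rw [if_neg (by simp [List.isEmpty_iff, hne])]
  rw [pvRep_go old new hne s.length s [] (le_refl _)]
  simp

-- prefix reflection: if pvRep's output starts with a tail of `base`, so did its input
theorem pvRep_reflect (old new base : List Char) (_hne : old ≠ [])
    (hnew : ∀ u ∈ base.tails, u ≠ [] → ¬ u <+: new)
    (hlen : base.length ≤ new.length) :
    ∀ (t u : List Char), u ∈ base.tails → u <+: pvRep old new t → u <+: t := by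
  intro t
  induction t using pvRep.induct (old := old) with
  | case1 =>
    intro u _ hu
    rw [pvRep_nil] at hu
    simp [List.prefix_nil.mp hu]
  | case2 c t hpre ih =>
    intro u humem hu
    rcases u with _ | ⟨x, u'⟩
    · exact List.nil_prefix
    rw [pvRep, if_pos hpre] at hu
    exfalso
    have hul : (x :: u').length ≤ new.length := by
      have := List.IsSuffix.length_le ((List.mem_tails _ _).mp humem)
      omega
    exact hnew _ humem (by simp) ((List.isPrefix_append_of_length hul).mp hu)
  | case3 c t hpre ih =>
    intro u humem hu
    rcases u with _ | ⟨x, u'⟩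
    · exact List.nil_prefix
    rw [pvRep_nofire _ _ _ _ hpre] at hu
    rw [List.cons_prefix_cons] at hu ⊢
    refine ⟨hu.1, ih u' ?_ hu.2⟩
    rw [List.mem_tails] at humem ⊢
    exact (List.suffix_cons x u').trans humem

-- A's four passes, in order, on the list side
def pvChain (s : List Char) : List Char :=
  pvRep ("MONICA".toList) ("INDESTRUCTIBLE_AUTOOPS".toList)
    (pvRep ("monica".toList) ("indestructible_autoops".toList)
      (pvRep ("Monica".toList) ("IndestructibleAutoOps".toList)
        (pvRep ("Monica AI".toList) ("IndestructibleAutoOps AI".toList) s)))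

theorem pvChain_eq_pvScan : ∀ s : List Char, pvChain s = pvScan s := by
  intro s
  induction s using pvScan.induct with
  | case1 => simp [pvChain, pvRep_nil, pvScan]
  | case2 c t h1 ih =>
    -- cs starts with "Monica AI"
    obtain ⟨X, hX⟩ := List.isPrefixOf_iff_prefix.mp h1
    have htd : t.drop 8 = X := by
      have := congrArg (List.drop 9) hX
      simpa using this.symm
    rw [htd] at ih
    rw [pvScan, if_pos h1, htd, ← ih, ← hX]
    unfold pvChain
    rw [pvRep_fire _ _ (by decide) X,
      pvRep_append ("Monica".toList) _ 'M' (by decide) ("IndestructibleAutoOps AI".toList) _ (by decide),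
      pvRep_append ("monica".toList) _ 'm' (by decide) ("IndestructibleAutoOps AI".toList) _ (by decide),
      pvRep_append ("MONICA".toList) _ 'M' (by decide) ("IndestructibleAutoOps AI".toList) _ (by decide)]
  | case3 c t h1 h2 ih =>
    -- starts with "Monica", not "Monica AI"
    obtain ⟨X, hX⟩ := List.isPrefixOf_iff_prefix.mp h2
    have htd : t.drop 5 = X := by
      have := congrArg (List.drop 6) hX
      simpa using this.symm
    rw [htd] at ih
    have hM : c = 'M' ∧ t = "onica".toList ++ X := by
      have := hX.symm; simp at this; exact ⟨this.1, by simp [this.2.symm]⟩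
    rw [pvScan, if_neg h1, if_pos h2, htd, ← ih, ← hX]
    unfold pvChain
    have hr1 : pvRep ("Monica AI".toList) ("IndestructibleAutoOps AI".toList) ("Monica".toList ++ X)
        = "Monica".toList ++ pvRep ("Monica AI".toList) ("IndestructibleAutoOps AI".toList) X := by
      rw [hX, pvRep_nofire _ _ _ _ h1, hM.2,
        pvRep_append _ _ 'M' (by decide) ("onica".toList) _ (by decide)]
      simp [hM.1]
    rw [hr1,
      pvRep_fire _ _ (by decide) _,
      pvRep_append ("monica".toList) _ 'm' (by decide) ("IndestructibleAutoOps".toList) _ (by decide),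
      pvRep_append ("MONICA".toList) _ 'M' (by decide) ("IndestructibleAutoOps".toList) _ (by decide)]
  | case4 c t h1 h2 h3 ih =>
    -- starts with "monica"
    obtain ⟨X, hX⟩ := List.isPrefixOf_iff_prefix.mp h3
    have htd : t.drop 5 = X := by
      have := congrArg (List.drop 6) hX
      simpa using this.symm
    rw [htd] at ih
    rw [pvScan, if_neg h1, if_neg h2, if_pos h3, htd, ← ih, ← hX]
    unfold pvChain
    rw [pvRep_append ("Monica AI".toList) _ 'M' (by decide) ("monica".toList) _ (by decide),
      pvRep_append ("Monica".toList) _ 'M' (by decide) ("monica".toList) _ (by decide),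
      pvRep_fire _ _ (by decide) _,
      pvRep_append ("MONICA".toList) _ 'M' (by decide) ("indestructible_autoops".toList) _ (by decide)]
  | case5 c t h1 h2 h3 h4 ih =>
    -- starts with "MONICA"
    obtain ⟨X, hX⟩ := List.isPrefixOf_iff_prefix.mp h4
    have htd : t.drop 5 = X := by
      have := congrArg (List.drop 6) hX
      simpa using this.symm
    rw [htd] at ih
    have hM : c = 'M' ∧ t = "ONICA".toList ++ X := by
      have := hX.symm; simp at this; exact ⟨this.1, by simp [this.2.symm]⟩
    rw [pvScan, if_neg h1, if_neg h2, if_neg h3, if_pos h4, htd, ← ih, ← hX]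
    unfold pvChain
    have hr1 : pvRep ("Monica AI".toList) ("IndestructibleAutoOps AI".toList) ("MONICA".toList ++ X)
        = "MONICA".toList ++ pvRep ("Monica AI".toList) ("IndestructibleAutoOps AI".toList) X := by
      rw [hX, pvRep_nofire _ _ _ _ h1, hM.2,
        pvRep_append _ _ 'M' (by decide) ("ONICA".toList) _ (by decide)]
      simp [hM.1]
    have hr2 : ∀ Y : List Char,
        pvRep ("Monica".toList) ("IndestructibleAutoOps".toList) ("MONICA".toList ++ Y)
        = "MONICA".toList ++ pvRep ("Monica".toList) ("IndestructibleAutoOps".toList) Y := by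
      intro Y
      have hnf : ¬ ("Monica".toList).isPrefixOf ('M' :: ("ONICA".toList ++ Y)) = true := by
        rw [List.isPrefixOf_iff_prefix]
        intro hp
        rw [show ("Monica".toList) = ['M','o','n','i','c','a'] from by decide,
          show ("ONICA".toList) = ['O','N','I','C','A'] from by decide] at hp
        simp [List.cons_prefix_cons] at hp
      calc pvRep ("Monica".toList) ("IndestructibleAutoOps".toList) ("MONICA".toList ++ Y)
          = pvRep ("Monica".toList) ("IndestructibleAutoOps".toList) ('M' :: ("ONICA".toList ++ Y)) := by
            congr 1
        _ = 'M' :: pvRep ("Monica".toList) ("IndestructibleAutoOps".toList) ("ONICA".toList ++ Y) :=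
            pvRep_nofire _ _ _ _ hnf
        _ = "MONICA".toList ++ pvRep ("Monica".toList) ("IndestructibleAutoOps".toList) Y := by
            rw [pvRep_append ("Monica".toList) ("IndestructibleAutoOps".toList) 'M'
              (by decide) ("ONICA".toList) _ (by decide)]
            rw [show ("MONICA".toList) = 'M' :: "ONICA".toList from by decide]
            simp
    rw [hr1, hr2,
      pvRep_append ("monica".toList) _ 'm' (by decide) ("MONICA".toList) _ (by decide),
      pvRep_fire _ _ (by decide) _]
  | case6 c t h1 h2 h3 h4 ih =>
    -- no pattern matches at this position
    rw [pvScan, if_neg h1, if_neg h2, if_neg h3, if_neg h4, ← ih]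
    unfold pvChain
    rw [pvRep_nofire _ _ _ _ h1]
    have hr2 : ¬ ("Monica".toList).isPrefixOf
        (c :: pvRep ("Monica AI".toList) ("IndestructibleAutoOps AI".toList) t) = true := by
      rw [List.isPrefixOf_iff_prefix]
      intro hp
      obtain ⟨hc, hp'⟩ := List.cons_prefix_cons.mp (by simpa using hp)
      have ht : "onica".toList <+: t :=
        pvRep_reflect ("Monica AI".toList) ("IndestructibleAutoOps AI".toList) ("onica".toList)
          (by decide) (by decide) (by decide) t _ (by rw [List.mem_tails]) (by simpa using hp')
      exact h2 (by rw [List.isPrefixOf_iff_prefix]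
                   show "Monica".toList <+: c :: t
                   simpa using List.cons_prefix_cons.mpr ⟨hc, ht⟩)
    rw [pvRep_nofire _ _ _ _ hr2]
    have hr3 : ¬ ("monica".toList).isPrefixOf
        (c :: pvRep ("Monica".toList) ("IndestructibleAutoOps".toList)
          (pvRep ("Monica AI".toList) ("IndestructibleAutoOps AI".toList) t)) = true := by
      rw [List.isPrefixOf_iff_prefix]
      intro hp
      obtain ⟨hc, hp'⟩ := List.cons_prefix_cons.mp (by simpa using hp)
      have ht2 : "onica".toList <+: pvRep ("Monica AI".toList) ("IndestructibleAutoOps AI".toList) t :=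
        pvRep_reflect ("Monica".toList) ("IndestructibleAutoOps".toList) ("onica".toList)
          (by decide) (by decide) (by decide) _ _ (by rw [List.mem_tails]) (by simpa using hp')
      have ht : "onica".toList <+: t :=
        pvRep_reflect ("Monica AI".toList) ("IndestructibleAutoOps AI".toList) ("onica".toList)
          (by decide) (by decide) (by decide) t _ (by rw [List.mem_tails]) ht2
      exact h3 (by rw [List.isPrefixOf_iff_prefix]
                   show "monica".toList <+: c :: t
                   simpa using List.cons_prefix_cons.mpr ⟨hc, ht⟩)
    rw [pvRep_nofire _ _ _ _ hr3]
    have hr4 : ¬ ("MONICA".toList).isPrefixOf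
        (c :: pvRep ("monica".toList) ("indestructible_autoops".toList)
          (pvRep ("Monica".toList) ("IndestructibleAutoOps".toList)
            (pvRep ("Monica AI".toList) ("IndestructibleAutoOps AI".toList) t))) = true := by
      rw [List.isPrefixOf_iff_prefix]
      intro hp
      obtain ⟨hc, hp'⟩ := List.cons_prefix_cons.mp (by simpa using hp)
      have ht3 : "ONICA".toList <+: pvRep ("Monica".toList) ("IndestructibleAutoOps".toList)
          (pvRep ("Monica AI".toList) ("IndestructibleAutoOps AI".toList) t) :=
        pvRep_reflect ("monica".toList) ("indestructible_autoops".toList) ("ONICA".toList)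
          (by decide) (by decide) (by decide) _ _ (by rw [List.mem_tails]) (by simpa using hp')
      have ht2 : "ONICA".toList <+: pvRep ("Monica AI".toList) ("IndestructibleAutoOps AI".toList) t :=
        pvRep_reflect ("Monica".toList) ("IndestructibleAutoOps".toList) ("ONICA".toList)
          (by decide) (by decide) (by decide) _ _ (by rw [List.mem_tails]) ht3
      have ht : "ONICA".toList <+: t :=
        pvRep_reflect ("Monica AI".toList) ("IndestructibleAutoOps AI".toList) ("ONICA".toList)
          (by decide) (by decide) (by decide) t _ (by rw [List.mem_tails]) ht2
      exact h4 (by rw [List.isPrefixOf_iff_prefix]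
                   show "MONICA".toList <+: c :: t
                   simpa using List.cons_prefix_cons.mpr ⟨hc, ht⟩)
    rw [pvRep_nofire _ _ _ _ hr4]

-- ===== VERDICT (by name: the statement is the Claim_ definition above) =====
theorem convert_references_to_indestructible_spec : Claim_equal_convert_references_to_indestructible := by
  intro text _
  unfold Spec_convert_references_to_indestructible
  unfold convert_references_to_indestructible convert_references_to_indestructible_alt
  match text with
  | none => rfl
  | some t =>
    by_cases ht : t = ""
    · simp [ht]
    · simp only [if_neg ht, Option.some.injEq]
      apply String.ext
      rw [String.toList_ofList, ← pvChain_eq_pvScan]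
      simp only [pvReplacements, List.foldl]
      rw [PySem.Str.toList_replace, PySem.Str.toList_replace, PySem.Str.toList_replace,
        PySem.Str.toList_replace]
      rw [replace_eq_pvRep _ _ _ (by decide), replace_eq_pvRep _ _ _ (by decide),
        replace_eq_pvRep _ _ _ (by decide), replace_eq_pvRep _ _ _ (by decide)]
      rfl
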